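-- pv_equiv track=rewrite | github.com/seijasdz/HMMPredictor2 | converter_to.py | converter_to
-- ===== SOURCE A (Python) =====
-- def converter_to(sequence, order=2):
--     new_list = []
--     for index, element in enumerate(sequence):
--         if index > order - 1:
--             emission_name = element + '|'
--             for x in range(order, 0, -1):
--                 emission_name += sequence[index - x]
--             new_list.append(emission_name)
--     return new_list
-- ===== SOURCE B (Python) =====
-- def converter_to(sequence, order=2):
--     k = max(order, 0)
--     if k > len(sequence):
--         return []
--     shifts = [sequence[i:] for i in range(k + 1)]
--     return [t[-1] + '|' + ''.join(t[:-1]) for t in zip(*shifts)]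
-- ===== Notes on version B (the rewrite author's own statement) =====
-- stated objective: idiomatic
-- what changed: Replaces the index-arithmetic scan (enumerate with an inner back-indexing loop sequence[index-x]) by zipping order+1 progressively shifted slices of the sequence and mapping each aligned window to last + '|' + join(rest).
import Mathlib
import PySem

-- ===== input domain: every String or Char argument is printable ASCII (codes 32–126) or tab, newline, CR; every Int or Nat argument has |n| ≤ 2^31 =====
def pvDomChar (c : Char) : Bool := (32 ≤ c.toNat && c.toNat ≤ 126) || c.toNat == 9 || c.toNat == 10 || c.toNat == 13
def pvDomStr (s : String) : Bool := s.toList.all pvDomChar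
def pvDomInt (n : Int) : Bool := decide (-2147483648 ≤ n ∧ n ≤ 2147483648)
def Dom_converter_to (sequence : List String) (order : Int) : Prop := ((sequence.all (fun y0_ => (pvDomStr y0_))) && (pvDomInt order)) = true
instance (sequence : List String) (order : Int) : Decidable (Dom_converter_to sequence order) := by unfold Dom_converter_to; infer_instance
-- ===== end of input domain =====

-- B replaces A's enumerate + back-indexing inner loop by zipping order+1 shifted slices
-- and mapping each aligned window; objective: more idiomatic, same cost.

-- ===== PORT A =====
-- The pyGetD default "" is never used: in the taken branch index - x is always in range.
def converter_to (sequence : List String) (order : Int) : List String :=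
  (PySem.List.enumerate sequence 0).foldl
    (fun new_list ie =>
      if ie.1 > order - 1 then
        new_list ++ [(PySem.List.pyRange order 0 (-1)).foldl
          (fun emission_name x => emission_name ++ PySem.List.pyGetD sequence (ie.1 - x) "")
          (ie.2 ++ "|")]
      else new_list)
    []

-- ===== PORT B =====
-- zip(*shifts): rows while every shifted slice still has an element (headD default "" never used).
def pyZipRows : List String → List (List String) → List (List String)
  | [], _ => []
  | a :: t, rest =>
    if rest.all (fun l => !l.isEmpty) then
      (a :: rest.map (fun l => l.headD "")) :: pyZipRows t (rest.map List.tail)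
    else []

def converter_to_alt (sequence : List String) (order : Int) : List String :=
  let k : Nat := (max order 0).toNat
  if sequence.length < k then []
  else match (List.range (k + 1)).map
      (fun (i : Nat) => PySem.List.slice sequence (some (i : Int)) none) with
  | [] => []   -- unreachable: k + 1 ≥ 1
  | f :: rest =>
    (pyZipRows f rest).map (fun t =>
      PySem.List.pyGetD t (-1) "" ++ "|" ++
        String.join (PySem.List.slice t none (some (-1))))

-- ===== PRECONDITION & SPEC =====
def Spec_converter_to (sequence : List String) (order : Int) (out : List String) : Prop := out = converter_to_alt sequence order
instance (sequence : List String) (order : Int) (out : List String) : Decidable (Spec_converter_to sequence order out) := by unfold Spec_converter_to; infer_instance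

-- ===== CLAIM (what is proved, stated in full; the proofs are below) =====
def Claim_equal_converter_to : Prop := ∀ (sequence : List String) (order : Int), Dom_converter_to sequence order → Spec_converter_to sequence order (converter_to sequence order)

-- ===== LEMMAS AND PROOFS =====

-- the common normal form: one output entry per window start i
def pvWin (s : List String) (k i : Nat) : List String :=
  (List.range (k + 1)).map (fun j => s.getD (i + j) "")

def pvNorm (s : List String) (k : Nat) : List String :=
  (List.range (s.length - k)).map
    (fun i => s.getD (i + k) "" ++ "|" ++ String.join ((s.drop i).take k))

theorem joinCons (a : String) (t : List String) (ih : ∀ s, t.foldl (· ++ ·) s = s ++ String.join t) :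
    String.join (a :: t) = a ++ String.join t := by
  rw [String.join, List.foldl_cons]
  have : "" ++ a = a := by simp
  rw [this, ih a]

theorem joinFold (l : List String) (s : String) : l.foldl (· ++ ·) s = s ++ String.join l := by
  induction l generalizing s with
  | nil => simp [String.join]
  | cons a t ih => rw [List.foldl_cons, ih (s ++ a), joinCons a t ih, String.append_assoc]

theorem winTake (s : List String) (i k : Nat) (h : i + k ≤ s.length) :
    (List.range k).map (fun c => s.getD (i + c) "") = (s.drop i).take k := by
  apply List.ext_getElem
  · simp; omega
  · intro j h1 h2
    simp only [List.getElem_map, List.getElem_range, List.getElem_take, List.getElem_drop]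
    rw [List.getD_eq_getElem s "" (by simp at h1; omega)]

theorem pvWin_cons_succ (a : String) (t : List String) (k i : Nat) :
    pvWin (a :: t) k (i + 1) = pvWin t k i := by
  unfold pvWin
  apply List.map_congr_left
  intro j hj
  rw [show i + 1 + j = (i + j) + 1 by omega, List.getD_cons_succ]

theorem pvZip_spec (s : List String) (k : Nat) :
    pyZipRows s ((List.range k).map (fun i => s.drop (i + 1))) =
      (List.range (s.length - k)).map (fun i => pvWin s k i) := by
  induction s with
  | nil => simp [pyZipRows]
  | cons a t ih =>
    have hrest : (List.range k).map (fun i => (a :: t).drop (i + 1)) = (List.range k).map (fun i => t.drop i) := by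
      simp
    rw [hrest, pyZipRows]
    by_cases h : k ≤ t.length
    · have hall : ((List.range k).map (fun i => t.drop i)).all (fun l => !l.isEmpty) = true := by
        simp [List.all_eq_true]
        intro i hi
        omega
      rw [if_pos hall]
      have htails : ((List.range k).map (fun i => t.drop i)).map List.tail
          = (List.range k).map (fun i => t.drop (i + 1)) := by
        simp [List.map_map, Function.comp, List.tail_drop]
      have hheads : ((List.range k).map (fun i => t.drop i)).map (fun l => l.headD "")
          = (List.range k).map (fun i => t.getD i "") := by
        rw [List.map_map]
        apply List.map_congr_left
        intro i hi
        simp [List.head?_drop, List.getD_eq_getElem?_getD]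
      have hlen : (a :: t).length - k = (t.length - k) + 1 := by simp; omega
      rw [htails, hheads, ih, hlen, List.range_succ_eq_map]
      simp only [List.map_cons, List.map_map]
      congr 1
      · simp [pvWin, List.range_succ_eq_map, List.map_map, Function.comp]
      · apply List.map_congr_left
        intro i hi
        simpa [Function.comp, Nat.succ_eq_add_one] using (pvWin_cons_succ a t k i).symm
    · have hall : ((List.range k).map (fun i => t.drop i)).all (fun l => !l.isEmpty) = false := by
        simp [List.all_eq_false]
        exact ⟨t.length, by omega, by simp⟩
      rw [if_neg (by simp [hall])]
      have hz : (a :: t).length - k = 0 := by simp only [List.length_cons]; omega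
      rw [hz]
      simp

theorem pvWin_split (s : List String) (k i : Nat) :
    pvWin s k i = (List.range k).map (fun j => s.getD (i + j) "") ++ [s.getD (i + k) ""] := by
  unfold pvWin
  rw [List.range_succ, List.map_append, List.map_cons, List.map_nil]

theorem pvB_eq_norm (sequence : List String) (order : Int) :
    converter_to_alt sequence order = pvNorm sequence (max order 0).toNat := by
  have hshifts : (List.range ((max order 0).toNat + 1)).map
        (fun (i : Nat) => PySem.List.slice sequence (some (i : Int)) none)
      = sequence :: (List.range (max order 0).toNat).map (fun i => sequence.drop (i + 1)) := by
    rw [List.range_succ_eq_map, List.map_cons, List.map_map]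
    simp [PySem.List.slice_from_natCast, Function.comp]
  simp only [converter_to_alt]
  by_cases hbig : sequence.length < (max order 0).toNat
  · rw [if_pos hbig]
    unfold pvNorm
    rw [show sequence.length - (max order 0).toNat = 0 by omega]
    simp
  rw [if_neg hbig, hshifts]
  show (pyZipRows sequence ((List.range (max order 0).toNat).map (fun i => sequence.drop (i + 1)))).map
      (fun t => PySem.List.pyGetD t (-1) "" ++ "|" ++ String.join (PySem.List.slice t none (some (-1))))
    = pvNorm sequence (max order 0).toNat
  rw [pvZip_spec]
  unfold pvNorm
  rw [List.map_map]
  apply List.map_congr_left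
  intro i hi
  simp only [Function.comp, List.mem_range] at hi ⊢
  have hik : i + (max order 0).toNat ≤ sequence.length := by omega
  rw [pvWin_split, PySem.List.pyGetD_neg_one_append_singleton, PySem.List.slice_to_neg_one,
    List.dropLast_concat, winTake sequence i (max order 0).toNat hik]

theorem pvA_eq_norm (sequence : List String) (order : Int) :
    converter_to sequence order = pvNorm sequence (max order 0).toNat := by
  unfold converter_to
  rw [PySem.List.foldl_append_ite (p := fun ie : Int × String => ie.1 > order - 1)]
  rw [PySem.List.enumerate_eq_map_pyRange (d := "")]
  rw [List.filter_map, List.map_map]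
  simp only [Function.comp_def, List.nil_append]
  have hlen : PySem.List.len sequence = (sequence.length : Int) := by
    simp [PySem.List.len]
  have hsplit : PySem.List.pyRange 0 (PySem.List.len sequence) 1
      = PySem.List.pyRange 0 ((min (max order 0).toNat sequence.length : Nat) : Int) 1
        ++ PySem.List.pyRange ((min (max order 0).toNat sequence.length : Nat) : Int) (sequence.length : Int) 1 := by
    rw [hlen]
    exact PySem.List.pyRange_one_append 0 _ _ (by omega) (by omega)
  rw [hsplit, List.filter_append]
  have h1 : (PySem.List.pyRange 0 ((min (max order 0).toNat sequence.length : Nat) : Int) 1).filter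
      (fun j => decide (j > order - 1)) = [] := by
    rw [List.filter_eq_nil_iff]
    intro j hj
    rw [PySem.List.mem_pyRange_one] at hj
    simp only [decide_eq_true_eq, not_lt]
    omega
  have h2 : (PySem.List.pyRange ((min (max order 0).toNat sequence.length : Nat) : Int) (sequence.length : Int) 1).filter
      (fun j => decide (j > order - 1))
      = PySem.List.pyRange ((min (max order 0).toNat sequence.length : Nat) : Int) (sequence.length : Int) 1 := by
    rw [List.filter_eq_self]
    intro j hj
    rw [PySem.List.mem_pyRange_one] at hj
    simp only [decide_eq_true_eq]
    omega
  rw [h1, h2, List.nil_append, PySem.List.pyRange_one, List.map_map]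
  have hcnt : ((sequence.length : Int) - ((min (max order 0).toNat sequence.length : Nat) : Int)).toNat
      = sequence.length - (max order 0).toNat := by omega
  rw [hcnt]
  unfold pvNorm
  apply List.map_congr_left
  intro i hi
  simp only [Function.comp_def, List.mem_range] at hi ⊢
  have hKn : (max order 0).toNat ≤ sequence.length := by omega
  have hidx : ((min (max order 0).toNat sequence.length : Nat) : Int) + (i : Int)
      = (((max order 0).toNat + i : Nat) : Int) := by push_cast; omega
  rw [hidx, PySem.List.pyGetD_natCast]
  have hrange : PySem.List.pyRange order 0 (-1)
      = (List.range (max order 0).toNat).map (fun (c : Nat) => order - (c : Int)) := by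
    rw [PySem.List.pyRange_neg_one]
    have h0 : (order - 0).toNat = (max order 0).toNat := by omega
    rw [h0]
  rw [hrange, List.foldl_map]
  have hcong : List.foldl
        (fun (x : String) (y : Nat) => x ++ PySem.List.pyGetD sequence ((((max order 0).toNat + i : Nat) : Int) - (order - (y : Int))) "")
        (sequence.getD ((max order 0).toNat + i) "" ++ "|") (List.range (max order 0).toNat)
      = List.foldl (fun (x : String) (y : Nat) => x ++ sequence.getD (i + y) "")
        (sequence.getD ((max order 0).toNat + i) "" ++ "|") (List.range (max order 0).toNat) := by
    apply PySem.List.foldl_congr_mem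
    intro acc c hc
    rw [List.mem_range] at hc
    have hc2 : (((max order 0).toNat + i : Nat) : Int) - (order - (c : Int)) = ((i + c : Nat) : Int) := by
      push_cast
      omega
    rw [hc2, PySem.List.pyGetD_natCast]
  rw [hcong]
  have hjoin : List.foldl (fun (x : String) (y : Nat) => x ++ sequence.getD (i + y) "")
        (sequence.getD ((max order 0).toNat + i) "" ++ "|") (List.range (max order 0).toNat)
      = (sequence.getD ((max order 0).toNat + i) "" ++ "|")
          ++ String.join ((List.range (max order 0).toNat).map (fun c => sequence.getD (i + c) "")) := by
    rw [← List.foldl_map]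
    exact joinFold _ _
  rw [hjoin, winTake sequence i (max order 0).toNat (by omega), Nat.add_comm (max order 0).toNat i]

-- ===== VERDICT (by name: the statement is the Claim_ definition above) =====
theorem converter_to_spec : Claim_equal_converter_to := by
  intro sequence order _
  unfold Spec_converter_to
  rw [pvA_eq_norm, pvB_eq_norm]
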